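-- pv_equiv track=rewrite | github.com/T14da-1108/HW-week9 | tasks/count_util/count_util.py | count_util
-- ===== SOURCE A (Python) =====
-- def count_util(text: str, flags: str | None = None) -> dict[str, int]:
--     if not flags:
--         flags = "-m -l -L -w"
--
--     active_flags = set(flags.replace("-", "").replace(" ", ""))
--     result = {}
--
--     lines = text.splitlines()
--
--     if "l" in active_flags:
--         result["lines"] = len(lines) if text else 0
--
--     if "m" in active_flags:
--         result["chars"] = len(text)
--
--     if "w" in active_flags:
--         result["words"] = sum(len(line.split()) for line in lines)
--
--     if "L" in active_flags:
--         result["longest_line"] = max((len(line) for line in lines), default=0)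
--
--     return result
-- ===== SOURCE B (Python) =====
-- def count_util(text: str, flags: str | None = None) -> dict[str, int]:
--     if not flags:
--         flags = "-m -l -L -w"
--
--     active_flags = set(flags.replace("-", "").replace(" ", ""))
--
--     # one character-level scan: no splitlines(), no split()
--     n = len(text)
--     i = 0
--     lines = 0
--     words = 0
--     longest = 0
--     cur = 0
--     in_word = False
--     while i < n:
--         c = text[i]
--         if c == '\r' and i + 1 < n and text[i + 1] == '\n':
--             lines += 1
--             longest = max(longest, cur)
--             cur = 0
--             in_word = False
--             i += 2
--             continue
--         if c == '\n' or c == '\r':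
--             lines += 1
--             longest = max(longest, cur)
--             cur = 0
--             in_word = False
--         else:
--             if c == ' ' or c == '\t':
--                 in_word = False
--             else:
--                 if not in_word:
--                     words += 1
--                     in_word = True
--             cur += 1
--         i += 1
--     if cur > 0:
--         lines += 1
--     longest = max(longest, cur)
--
--     result = {}
--     if "l" in active_flags:
--         result["lines"] = lines
--     if "m" in active_flags:
--         result["chars"] = n
--     if "w" in active_flags:
--         result["words"] = words
--     if "L" in active_flags:
--         result["longest_line"] = longest
--     return result
-- ===== Notes on version B (the rewrite author's own statement) =====
-- stated objective: alternative
-- what changed: A builds the line list with splitlines() and then runs split() per line plus a max() generator over the lines; B never builds the line list: it makes one character-level scan of the text with an index while-loop, counting line breaks ('\n', '\r', '\r\n'), word starts (whitespace-to-nonword transitions) and the running longest-line length in a single pass.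
import Mathlib
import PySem

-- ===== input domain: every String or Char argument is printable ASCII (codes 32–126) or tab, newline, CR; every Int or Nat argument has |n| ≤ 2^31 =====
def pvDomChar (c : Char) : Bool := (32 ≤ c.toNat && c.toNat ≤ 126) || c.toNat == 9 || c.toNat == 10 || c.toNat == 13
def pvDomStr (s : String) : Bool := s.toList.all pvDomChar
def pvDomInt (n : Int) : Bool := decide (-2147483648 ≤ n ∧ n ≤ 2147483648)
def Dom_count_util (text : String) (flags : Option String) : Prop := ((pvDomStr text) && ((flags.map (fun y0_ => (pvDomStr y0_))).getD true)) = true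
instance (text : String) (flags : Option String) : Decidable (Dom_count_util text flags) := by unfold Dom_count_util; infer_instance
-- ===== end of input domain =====

-- B replaces A's splitlines()/per-line split() passes by one character-level scan of the
-- text that counts lines, words and the longest line in a single loop (alternative algorithm).

-- ===== PORT A =====
def count_util (text : String) (flags : Option String) : List (String × Int) :=
  let flags1 : String :=
    match flags with
    | none => "-m -l -L -w"
    | some s => if s = "" then "-m -l -L -w" else s
  let active : PySem.Set Char :=
    PySem.Set.ofList (PySem.Str.replace (PySem.Str.replace flags1 "-" "") " " "").toList
  let lines := PySem.Str.splitlines text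
  let result : PySem.Dict String Int := PySem.Dict.empty
  let result := if PySem.Set.contains active 'l' then
      result.insert "lines" (if text ≠ "" then PySem.List.len lines else 0) else result
  let result := if PySem.Set.contains active 'm' then
      result.insert "chars" (PySem.Str.len text) else result
  let result := if PySem.Set.contains active 'w' then
      result.insert "words" ((lines.map (fun line => PySem.List.len (PySem.Str.split₀ line))).sum) else result
  let result := if PySem.Set.contains active 'L' then
      result.insert "longest_line" ((PySem.List.max? (lines.map (fun line => PySem.Str.len line)) (fun y => y)).getD 0) else result
  result.items

-- ===== PORT B =====
-- the while loop of Source B: state (lines, words, longest, cur, in_word), the i/i+1 window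
-- becomes the usual two-element list pattern; returns (lines, words, longest)
def scanB : List Char → Int → Int → Int → Int → Bool → Int × Int × Int
  | [], lines, words, longest, cur, _ =>
      ((if cur > 0 then lines + 1 else lines), words, max longest cur)
  | '\r' :: '\n' :: rest, lines, words, longest, cur, _ =>
      scanB rest (lines + 1) words (max longest cur) 0 false
  | c :: rest, lines, words, longest, cur, inw =>
      if c == '\n' || c == '\r' then scanB rest (lines + 1) words (max longest cur) 0 false
      else if c == ' ' || c == '\t' then scanB rest lines words longest (cur + 1) false
      else scanB rest lines (if inw then words else words + 1) longest (cur + 1) true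

def count_util_alt (text : String) (flags : Option String) : List (String × Int) :=
  let flags1 : String :=
    match flags with
    | none => "-m -l -L -w"
    | some s => if s = "" then "-m -l -L -w" else s
  let active : PySem.Set Char :=
    PySem.Set.ofList (PySem.Str.replace (PySem.Str.replace flags1 "-" "") " " "").toList
  let n : Int := PySem.Str.len text
  let t := scanB text.toList 0 0 0 0 false
  let result : PySem.Dict String Int := PySem.Dict.empty
  let result := if PySem.Set.contains active 'l' then
      result.insert "lines" t.1 else result
  let result := if PySem.Set.contains active 'm' then
      result.insert "chars" n else result
  let result := if PySem.Set.contains active 'w' then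
      result.insert "words" t.2.1 else result
  let result := if PySem.Set.contains active 'L' then
      result.insert "longest_line" t.2.2 else result
  result.items

-- ===== PRECONDITION & SPEC =====
def Spec_count_util (text : String) (flags : Option String) (out : List (String × Int)) : Prop := out = count_util_alt text flags
instance (text : String) (flags : Option String) (out : List (String × Int)) : Decidable (Spec_count_util text flags out) := by unfold Spec_count_util; infer_instance

-- ===== CLAIM (what is proved, stated in full; the proofs are below) =====
def Claim_equal_count_util : Prop := ∀ (text : String) (flags : Option String), Dom_count_util text flags → Spec_count_util text flags (count_util text flags)

-- ===== LEMMAS AND PROOFS =====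

-- reference functions mirroring the scan, one per counted quantity
def lcF : List Char → Int → Int
  | [], cur => if cur > 0 then 1 else 0
  | '\r' :: '\n' :: r, _ => 1 + lcF r 0
  | c :: r, cur => if c == '\n' || c == '\r' then 1 + lcF r 0 else lcF r (cur + 1)

def wcF : List Char → Bool → Int
  | [], _ => 0
  | '\r' :: '\n' :: r, _ => wcF r false
  | c :: r, inw =>
      if c == '\n' || c == '\r' || c == ' ' || c == '\t' then wcF r false
      else (if inw then 0 else 1) + wcF r true

def mlF : List Char → Int → Int
  | [], cur => cur
  | '\r' :: '\n' :: r, cur => max cur (mlF r 0)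
  | c :: r, cur => if c == '\n' || c == '\r' then max cur (mlF r 0) else mlF r (cur + 1)

def fmaxI (l : List Int) : Int := l.foldl max 0

-- the exact break-test lambda of PySem.Chars.splitlines
def isBc (c : Char) : Bool :=
  have n := c.toNat;
  decide (n = 10) || decide (n = 13) || decide (n = 11) || decide (n = 12) || decide (n = 28) || decide (n = 29) ||
          decide (n = 30) ||
        decide (n = 133) ||
      decide (n = 8232) ||
    decide (n = 8233)

theorem splitlines_eq_go (s : List Char) :
    PySem.Chars.splitlines s = PySem.Chars.splitlines.go isBc s [] [] := rfl

theorem char_toNat_inj (c d : Char) (h : c.toNat = d.toNat) : c = d := by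
  apply Char.ext
  exact UInt32.toNat_inj.mp (by simpa using h)

theorem beq_eq_decide_toNat (c d : Char) : (c == d) = decide (c.toNat = d.toNat) := by
  by_cases h : c = d
  · simp [h]
  · have h2 : ¬ c.toNat = d.toNat := fun hh => h (char_toNat_inj c d hh)
    simp [h, h2]

theorem isBc_dom (c : Char) (h : pvDomChar c = true) :
    isBc c = (c == '\n' || c == '\r') := by
  simp only [pvDomChar, Bool.or_eq_true, Bool.and_eq_true, decide_eq_true_eq, beq_iff_eq] at h
  simp only [isBc, beq_eq_decide_toNat]
  rw [Bool.eq_iff_iff]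
  simp only [Bool.or_eq_true, decide_eq_true_eq]
  simp only [show '\n'.toNat = 10 from rfl, show '\r'.toNat = 13 from rfl] at *
  omega

theorem isspace_dom (c : Char) (h : pvDomChar c = true) :
    PySem.Chars.isspace c = (c == '\n' || c == '\r' || c == ' ' || c == '\t') := by
  simp only [pvDomChar, Bool.or_eq_true, Bool.and_eq_true, decide_eq_true_eq, beq_iff_eq] at h
  simp only [PySem.Chars.isspace, beq_eq_decide_toNat]
  rw [Bool.eq_iff_iff]
  simp only [Bool.or_eq_true, Bool.and_eq_true, decide_eq_true_eq]
  simp only [show '\n'.toNat = 10 from rfl, show '\r'.toNat = 13 from rfl, show ' '.toNat = 32 from rfl, show '\t'.toNat = 9 from rfl] at *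
  omega

theorem scanB_eq :
    ∀ (s : List Char) (lines words longest cur : Int) (inw : Bool),
      scanB s lines words longest cur inw
        = (lines + lcF s cur, words + wcF s inw, max longest (mlF s cur)) := by
  intro s lines words longest cur inw
  induction s, lines, words, longest, cur, inw using scanB.induct with
  | case1 lines words longest cur inw =>
      simp only [scanB, lcF, wcF, mlF]
      rw [Prod.mk.injEq, Prod.mk.injEq]
      exact ⟨by split <;> omega, by omega, rfl⟩
  | case2 rest lines words longest cur inw ih =>
      simp only [scanB, lcF, wcF, mlF] at ih ⊢
      rw [ih, Prod.mk.injEq, Prod.mk.injEq]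
      exact ⟨by ring, rfl, by rw [max_assoc]⟩
  | case3 c rest lines words longest cur inw h hc ih =>
      rw [scanB.eq_3 _ _ _ _ _ _ _ h, lcF.eq_3 _ _ _ h, wcF.eq_3 _ _ _ h, mlF.eq_3 _ _ _ h]
      have hw : (c == '\n' || c == '\r' || c == ' ' || c == '\t') = true := by
        simp only [Bool.or_eq_true] at hc ⊢; tauto
      rw [if_pos hc, if_pos hw, if_pos hc, if_pos hc, ih, Prod.mk.injEq, Prod.mk.injEq]
      exact ⟨by ring, rfl, by rw [max_assoc]⟩
  | case4 c rest lines words longest cur inw h hc hsp ih =>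
      rw [scanB.eq_3 _ _ _ _ _ _ _ h, lcF.eq_3 _ _ _ h, wcF.eq_3 _ _ _ h, mlF.eq_3 _ _ _ h]
      have hw : (c == '\n' || c == '\r' || c == ' ' || c == '\t') = true := by
        simp only [Bool.or_eq_true] at hsp ⊢; tauto
      rw [if_neg hc, if_pos hsp, if_pos hw, if_neg hc, if_neg hc, ih]
  | case5 c rest lines words longest cur inw h hc hsp ih =>
      rw [scanB.eq_3 _ _ _ _ _ _ _ h, lcF.eq_3 _ _ _ h, wcF.eq_3 _ _ _ h, mlF.eq_3 _ _ _ h]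
      have hw : ¬ (c == '\n' || c == '\r' || c == ' ' || c == '\t') = true := by
        simp only [Bool.or_eq_true] at hc hsp ⊢; tauto
      rw [if_neg hc, if_neg hsp, if_neg hw, if_neg hc, if_neg hc, ih, Prod.mk.injEq, Prod.mk.injEq]
      exact ⟨rfl, by cases inw <;> simp <;> ring, rfl⟩
theorem wcF_cons (c : Char) (r : List Char) (inw : Bool) :
    wcF (c :: r) inw
      = if c == '\n' || c == '\r' || c == ' ' || c == '\t' then wcF r false
        else (if inw then 0 else 1) + wcF r true := by
  match r with
  | [] => rw [wcF.eq_3]; intro r1 _ hr; cases hr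
  | c2 :: r' =>
    by_cases hcc : c = '\r' ∧ c2 = '\n'
    · obtain ⟨h1, h2⟩ := hcc; subst h1; subst h2
      have : wcF ('\r' :: '\n' :: r') inw = wcF r' false := rfl
      rw [this]
      have hw : (('\r' : Char) == '\n' || ('\r' : Char) == '\r' || ('\r' : Char) == ' ' || ('\r' : Char) == '\t') = true := by decide
      rw [if_pos hw]
      rw [wcF.eq_3 _ _ _ (by intro r1 hh _; exact absurd hh (by decide)), if_pos (by decide)]
    · have hnc : ∀ (r1 : List Char), c = '\r' → c2 :: r' = '\n' :: r1 → False := by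
        intro r1 h1 h2
        cases h2; exact hcc ⟨h1, rfl⟩
      rw [wcF.eq_3 _ _ _ hnc]
theorem wcF_append_break (a : List Char) (c : Char) (b : List Char)
    (hc : (c == '\n' || c == '\r' || c == ' ' || c == '\t') = true) :
    ∀ inw, wcF (a ++ c :: b) inw = wcF a inw + wcF b false := by
  induction a with
  | nil => intro inw; rw [List.nil_append, wcF_cons, if_pos hc]; simp [wcF]
  | cons d a' ih =>
      intro inw
      rw [List.cons_append, wcF_cons, wcF_cons]
      split
      · rw [ih]
      · rw [ih]; ring
theorem mlF_nonneg : ∀ (s : List Char) (cur : Int), 0 ≤ cur → 0 ≤ mlF s cur := by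
  intro s cur h
  induction s, cur using mlF.induct with
  | case1 cur => simpa [mlF] using h
  | case2 r cur ih =>
      simp only [mlF]
      exact le_max_of_le_left h
  | case3 c r cur hne hc ih =>
      rw [mlF.eq_3 _ _ _ hne, if_pos hc]
      exact le_max_of_le_left h
  | case4 c r cur hne hc ih =>
      rw [mlF.eq_3 _ _ _ hne, if_neg hc]
      exact ih (by omega)
theorem foldl_max_init (l : List Int) : ∀ a b : Int, l.foldl max (max a b) = max a (l.foldl max b) := by
  induction l with
  | nil => intro a b; rfl
  | cons c t ih =>
      intro a b
      simp only [List.foldl_cons]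
      rw [max_assoc, ih]
theorem fmaxI_nonneg (l : List Int) : 0 ≤ fmaxI l := by
  have : ∀ a : Int, 0 ≤ a → 0 ≤ l.foldl max a := by
    induction l with
    | nil => intro a h; exact h
    | cons c t ih => intro a h; exact ih _ (le_max_of_le_left h)
  exact this 0 le_rfl
theorem fmaxI_cons (x : Int) (l : List Int) : fmaxI (x :: l) = max x (fmaxI l) := by
  show l.foldl max (max 0 x) = _
  rw [max_comm 0 x, foldl_max_init]
  rfl
theorem fmaxI_append (l₁ l₂ : List Int) : fmaxI (l₁ ++ l₂) = max (fmaxI l₁) (fmaxI l₂) := by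
  show (l₁ ++ l₂).foldl max 0 = _
  rw [List.foldl_append]
  have : l₁.foldl max 0 = max (fmaxI l₁) 0 := (max_eq_left (fmaxI_nonneg l₁)).symm
  rw [this, foldl_max_init]
  rfl
theorem fmaxI_reverse (l : List Int) : fmaxI l.reverse = fmaxI l := by
  induction l with
  | nil => rfl
  | cons x t ih =>
      rw [List.reverse_cons, fmaxI_append, ih, fmaxI_cons]
      rw [show fmaxI ([] : List Int) = 0 from rfl, fmaxI_cons, max_comm x 0, max_comm 0 x,
          ← max_assoc, max_comm (fmaxI t) x, max_assoc, max_eq_left (fmaxI_nonneg t)]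
theorem max?_getD_eq_fmaxI (l : List Int) (h : ∀ x ∈ l, 0 ≤ x) :
    (PySem.List.max? l (fun y => y)).getD 0 = fmaxI l := by
  cases l with
  | nil => rfl
  | cons x t =>
      rw [PySem.List.max?_id_cons, Option.getD_some, fmaxI_cons]
      have hx : 0 ≤ x := h x (by simp)
      calc List.foldl max x t = List.foldl max (max x 0) t := by rw [max_eq_left hx]
        _ = max x (List.foldl max 0 t) := foldl_max_init t x 0
theorem go_len (isBf : Char → Bool)
    (hB : ∀ c, pvDomChar c = true → isBf c = (c == '\n' || c == '\r')) :
    ∀ s cur acc, (∀ c ∈ s, pvDomChar c = true) →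
      ((PySem.Chars.splitlines.go isBf s cur acc).length : Int)
        = acc.length + lcF s (cur.length) := by
  intro s cur acc
  induction s, cur, acc using PySem.Chars.splitlines.go.induct isBf with
  | case1 cur acc hemp =>
      intro _
      rw [List.isEmpty_iff] at hemp
      subst hemp
      simp [PySem.Chars.splitlines.go, lcF]
  | case2 cur acc hemp =>
      intro _
      have hpos : 0 < cur.length := List.length_pos_of_ne_nil (fun h => hemp (by simp [h]))
      simp only [PySem.Chars.splitlines.go, if_neg hemp, lcF, List.length_reverse,
        List.length_cons]
      rw [if_pos (by exact_mod_cast hpos)]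
      push_cast
      ring
  | case3 rest cur acc ih =>
      intro hd
      have hdr : ∀ c ∈ rest, pvDomChar c = true := fun c hc => hd c (by simp [hc])
      have := ih hdr
      simp only [PySem.Chars.splitlines.go, lcF, this, List.length_cons, List.length_nil,
        Nat.cast_zero]
      push_cast
      ring
  | case4 c rest cur acc hne hb ih =>
      intro hd
      have hdc : pvDomChar c = true := hd c (by simp)
      have hdr : ∀ x ∈ rest, pvDomChar x = true := fun x hx => hd x (by simp [hx])
      have hc : (c == '\n' || c == '\r') = true := by rw [← hB c hdc]; exact hb
      rw [PySem.Chars.splitlines.go.eq_3 _ _ _ _ _ hne, if_pos hb, lcF.eq_3 _ _ _ hne, if_pos hc,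
          ih hdr]
      simp only [List.length_cons, List.length_nil, Nat.cast_zero]
      push_cast
      ring
  | case5 c rest cur acc hne hb ih =>
      intro hd
      have hdc : pvDomChar c = true := hd c (by simp)
      have hdr : ∀ x ∈ rest, pvDomChar x = true := fun x hx => hd x (by simp [hx])
      have hc : ¬ (c == '\n' || c == '\r') = true := by rw [← hB c hdc]; exact hb
      rw [PySem.Chars.splitlines.go.eq_3 _ _ _ _ _ hne, if_neg hb, lcF.eq_3 _ _ _ hne, if_neg hc,
          ih hdr]
      simp only [List.length_cons]
      push_cast
      ring
theorem go_longest (isBf : Char → Bool)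
    (hB : ∀ c, pvDomChar c = true → isBf c = (c == '\n' || c == '\r')) :
    ∀ s cur acc, (∀ c ∈ s, pvDomChar c = true) →
      fmaxI ((PySem.Chars.splitlines.go isBf s cur acc).map (fun l => (l.length : Int)))
        = max (fmaxI (acc.map (fun l => (l.length : Int)))) (mlF s (cur.length)) := by
  intro s cur acc
  induction s, cur, acc using PySem.Chars.splitlines.go.induct isBf with
  | case1 cur acc hemp =>
      intro _
      rw [List.isEmpty_iff] at hemp
      subst hemp
      simp only [PySem.Chars.splitlines.go, if_pos, List.isEmpty_nil, List.map_reverse,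
        fmaxI_reverse, mlF, List.length_nil, Nat.cast_zero]
      rw [max_eq_left (fmaxI_nonneg _)]
  | case2 cur acc hemp =>
      intro _
      simp only [PySem.Chars.splitlines.go, if_neg hemp, List.map_reverse, fmaxI_reverse,
        List.map_cons, fmaxI_cons, mlF, List.length_reverse]
      rw [max_comm]
  | case3 rest cur acc ih =>
      intro hd
      have hdr : ∀ c ∈ rest, pvDomChar c = true := fun c hc => hd c (by simp [hc])
      rw [show PySem.Chars.splitlines.go isBf ('\r' :: '\n' :: rest) cur acc
            = PySem.Chars.splitlines.go isBf rest [] (cur.reverse :: acc) from rfl,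
        ih hdr]
      simp only [List.map_cons, fmaxI_cons, mlF, List.length_nil, Nat.cast_zero,
        List.length_reverse]
      rw [← max_assoc, max_comm (fmaxI _) ((cur.length : Int)), max_assoc]
  | case4 c rest cur acc hne hb ih =>
      intro hd
      have hdc : pvDomChar c = true := hd c (by simp)
      have hdr : ∀ x ∈ rest, pvDomChar x = true := fun x hx => hd x (by simp [hx])
      have hc : (c == '\n' || c == '\r') = true := by rw [← hB c hdc]; exact hb
      rw [PySem.Chars.splitlines.go.eq_3 _ _ _ _ _ hne, if_pos hb, mlF.eq_3 _ _ _ hne, if_pos hc,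
          ih hdr]
      simp only [List.map_cons, fmaxI_cons, List.length_nil, Nat.cast_zero, List.length_reverse]
      rw [← max_assoc, max_comm (fmaxI _) ((cur.length : Int)), max_assoc]
  | case5 c rest cur acc hne hb ih =>
      intro hd
      have hdc : pvDomChar c = true := hd c (by simp)
      have hdr : ∀ x ∈ rest, pvDomChar x = true := fun x hx => hd x (by simp [hx])
      have hc : ¬ (c == '\n' || c == '\r') = true := by rw [← hB c hdc]; exact hb
      rw [PySem.Chars.splitlines.go.eq_3 _ _ _ _ _ hne, if_neg hb, mlF.eq_3 _ _ _ hne, if_neg hc,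
          ih hdr]
      simp only [List.length_cons]
      push_cast
      ring_nf
theorem split₀_go_len :
    ∀ s cur acc, (∀ c ∈ s, pvDomChar c = true) →
      ((PySem.Chars.split₀.go s cur acc).length : Int)
        = acc.length + (if cur.isEmpty then 0 else 1) + wcF s (!cur.isEmpty) := by
  intro s cur acc
  induction s, cur, acc using PySem.Chars.split₀.go.induct with
  | case1 cur acc hemp =>
      intro _
      simp [PySem.Chars.split₀.go, hemp, wcF]
  | case2 cur acc hemp =>
      intro _
      simp [PySem.Chars.split₀.go, hemp, wcF]
  | case3 c rest cur acc hsp hemp ih =>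
      intro hd
      have hdc := hd c (by simp)
      have hdr : ∀ x ∈ rest, pvDomChar x = true := fun x hx => hd x (by simp [hx])
      have hc : (c == '\n' || c == '\r' || c == ' ' || c == '\t') = true := by
        rw [← isspace_dom c hdc]; exact hsp
      rw [show PySem.Chars.split₀.go (c :: rest) cur acc = if PySem.Chars.isspace c = true then (if cur.isEmpty then PySem.Chars.split₀.go rest [] acc else PySem.Chars.split₀.go rest [] (cur.reverse :: acc)) else PySem.Chars.split₀.go rest (c :: cur) acc from rfl]
      rw [if_pos hsp, if_pos hemp, ih hdr, wcF_cons, if_pos hc]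
      simp [hemp]
  | case4 c rest cur acc hsp hemp ih =>
      intro hd
      have hdc := hd c (by simp)
      have hdr : ∀ x ∈ rest, pvDomChar x = true := fun x hx => hd x (by simp [hx])
      have hc : (c == '\n' || c == '\r' || c == ' ' || c == '\t') = true := by
        rw [← isspace_dom c hdc]; exact hsp
      rw [show PySem.Chars.split₀.go (c :: rest) cur acc = if PySem.Chars.isspace c = true then (if cur.isEmpty then PySem.Chars.split₀.go rest [] acc else PySem.Chars.split₀.go rest [] (cur.reverse :: acc)) else PySem.Chars.split₀.go rest (c :: cur) acc from rfl]
      rw [if_pos hsp, if_neg hemp, ih hdr, wcF_cons, if_pos hc]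
      simp [hemp]
  | case5 c rest cur acc hsp ih =>
      intro hd
      have hdc := hd c (by simp)
      have hdr : ∀ x ∈ rest, pvDomChar x = true := fun x hx => hd x (by simp [hx])
      have hc : ¬ (c == '\n' || c == '\r' || c == ' ' || c == '\t') = true := by
        rw [← isspace_dom c hdc]; exact hsp
      rw [show PySem.Chars.split₀.go (c :: rest) cur acc = if PySem.Chars.isspace c = true then (if cur.isEmpty then PySem.Chars.split₀.go rest [] acc else PySem.Chars.split₀.go rest [] (cur.reverse :: acc)) else PySem.Chars.split₀.go rest (c :: cur) acc from rfl]
      rw [if_neg hsp, ih hdr, wcF_cons, if_neg hc]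
      cases cur <;> simp <;> ring
theorem split₀_len (l : List Char) (h : ∀ c ∈ l, pvDomChar c = true) :
    ((PySem.Chars.split₀ l).length : Int) = wcF l false := by
  have := split₀_go_len l [] [] h
  simpa [PySem.Chars.split₀] using this
theorem go_words (isBf : Char → Bool)
    (hB : ∀ c, pvDomChar c = true → isBf c = (c == '\n' || c == '\r')) :
    ∀ s cur acc, (∀ c ∈ s, pvDomChar c = true) → (∀ c ∈ cur, pvDomChar c = true) →
      ((PySem.Chars.splitlines.go isBf s cur acc).map
          (fun l => ((PySem.Chars.split₀ l).length : Int))).sum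
        = (acc.map (fun l => ((PySem.Chars.split₀ l).length : Int))).sum
            + wcF (cur.reverse ++ s) false := by
  intro s cur acc
  induction s, cur, acc using PySem.Chars.splitlines.go.induct isBf with
  | case1 cur acc hemp =>
      intro _ _
      rw [List.isEmpty_iff] at hemp
      subst hemp
      simp only [PySem.Chars.splitlines.go, if_pos, List.isEmpty_nil, List.map_reverse,
        List.sum_reverse, List.reverse_nil, List.nil_append, wcF]
      ring
  | case2 cur acc hemp =>
      intro _ hdc
      have hdrev : ∀ c ∈ cur.reverse, pvDomChar c = true := fun c hc =>
        hdc c (List.mem_reverse.mp hc)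
      simp only [PySem.Chars.splitlines.go, if_neg hemp, List.map_reverse, List.sum_reverse,
        List.map_cons, List.sum_cons, List.append_nil, split₀_len cur.reverse hdrev]
      ring
  | case3 rest cur acc ih =>
      intro hd hdc
      have hdr : ∀ c ∈ rest, pvDomChar c = true := fun c hc => hd c (by simp [hc])
      have hdrev : ∀ c ∈ cur.reverse, pvDomChar c = true := fun c hc =>
        hdc c (List.mem_reverse.mp hc)
      rw [show PySem.Chars.splitlines.go isBf ('\r' :: '\n' :: rest) cur acc
            = PySem.Chars.splitlines.go isBf rest [] (cur.reverse :: acc) from rfl,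
        ih hdr (by intro c hc; simp at hc)]
      simp only [List.map_cons, List.sum_cons, List.reverse_nil, List.nil_append,
        split₀_len cur.reverse hdrev]
      rw [wcF_append_break cur.reverse '\r' ('\n' :: rest) rfl false, wcF_cons]
      norm_num
      ring
  | case4 c rest cur acc hne hb ih =>
      intro hd hdc
      have hdcc : pvDomChar c = true := hd c (by simp)
      have hdr : ∀ x ∈ rest, pvDomChar x = true := fun x hx => hd x (by simp [hx])
      have hdrev : ∀ x ∈ cur.reverse, pvDomChar x = true := fun x hx =>
        hdc x (List.mem_reverse.mp hx)
      have hc : (c == '\n' || c == '\r') = true := by rw [← hB c hdcc]; exact hb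
      have hc4 : (c == '\n' || c == '\r' || c == ' ' || c == '\t') = true := by
        simp only [Bool.or_eq_true] at hc ⊢
        rcases hc with h | h
        · exact Or.inl (Or.inl (Or.inl h))
        · exact Or.inl (Or.inl (Or.inr h))
      rw [PySem.Chars.splitlines.go.eq_3 _ _ _ _ _ hne, if_pos hb,
        ih hdr (by intro x hx; simp at hx)]
      simp only [List.map_cons, List.sum_cons, List.reverse_nil, List.nil_append,
        split₀_len cur.reverse hdrev]
      rw [wcF_append_break cur.reverse c rest hc4 false]
      ring
  | case5 c rest cur acc hne hb ih =>
      intro hd hdc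
      have hdcc : pvDomChar c = true := hd c (by simp)
      have hdr : ∀ x ∈ rest, pvDomChar x = true := fun x hx => hd x (by simp [hx])
      have hdcons : ∀ x ∈ c :: cur, pvDomChar x = true := by
        intro x hx
        rcases List.mem_cons.mp hx with rfl | hmem
        · exact hdcc
        · exact hdc x hmem
      rw [PySem.Chars.splitlines.go.eq_3 _ _ _ _ _ hne, if_neg hb, ih hdr hdcons]
      rw [List.reverse_cons, List.append_assoc]
      rfl

-- ===== VERDICT (by name: the statement is the Claim_ definition above) =====
theorem lines_val (text : String) (hd : ∀ c ∈ text.toList, pvDomChar c = true) :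
    (if text ≠ "" then PySem.List.len (PySem.Str.splitlines text) else 0)
      = lcF text.toList 0 := by
  by_cases htext : text = ""
  · subst htext
    simp [lcF]
  · rw [if_pos htext]
    have h1 : (PySem.Str.splitlines text).length
        = (PySem.Chars.splitlines text.toList).length := by
      rw [← PySem.Str.splitlines_map_toList, List.length_map]
    have h2 := go_len isBc isBc_dom text.toList [] [] hd
    simp only [PySem.List.len, h1, splitlines_eq_go]
    rw [h2]
    simp

theorem words_val (text : String) (hd : ∀ c ∈ text.toList, pvDomChar c = true) :
    ((PySem.Str.splitlines text).map
        (fun line => PySem.List.len (PySem.Str.split₀ line))).sum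
      = wcF text.toList false := by
  have hmap : (PySem.Str.splitlines text).map
      (fun line => PySem.List.len (PySem.Str.split₀ line))
      = ((PySem.Str.splitlines text).map String.toList).map
          (fun l => ((PySem.Chars.split₀ l).length : Int)) := by
    rw [List.map_map]
    apply List.map_congr_left
    intro line _
    simp only [Function.comp_apply, PySem.List.len, ← PySem.Str.split₀_map_toList,
      List.length_map]
  rw [hmap, PySem.Str.splitlines_map_toList, splitlines_eq_go,
    go_words isBc isBc_dom text.toList [] [] hd (by intro x hx; simp at hx)]
  simp

theorem longest_val (text : String) (hd : ∀ c ∈ text.toList, pvDomChar c = true) :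
    (PySem.List.max? ((PySem.Str.splitlines text).map (fun line => PySem.Str.len line))
        (fun y => y)).getD 0
      = mlF text.toList 0 := by
  have hmap : (PySem.Str.splitlines text).map (fun line => PySem.Str.len line)
      = ((PySem.Str.splitlines text).map String.toList).map (fun l => (l.length : Int)) := by
    rw [List.map_map]
    apply List.map_congr_left
    intro line _
    simp [PySem.Str.len_eq]
  rw [hmap, PySem.Str.splitlines_map_toList, splitlines_eq_go]
  rw [max?_getD_eq_fmaxI _ (by
    intro x hx
    rcases List.mem_map.mp hx with ⟨l, _, rfl⟩
    exact Int.natCast_nonneg _)]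
  rw [go_longest isBc isBc_dom text.toList [] [] hd]
  have : fmaxI (([] : List (List Char)).map (fun l => (l.length : Int))) = 0 := rfl
  rw [this, List.length_nil, Nat.cast_zero, max_eq_right (mlF_nonneg text.toList 0 le_rfl)]

-- ===== VERDICT (by name: the statement is the Claim_ definition above) =====
theorem count_util_spec : Claim_equal_count_util := by
  intro text flags hdom
  show count_util text flags = count_util_alt text flags
  have hd : ∀ c ∈ text.toList, pvDomChar c = true := by
    simp only [Dom_count_util, pvDomStr, Bool.and_eq_true, List.all_eq_true] at hdom
    exact fun c hc => hdom.1 c hc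
  simp only [count_util, count_util_alt]
  rw [scanB_eq, lines_val text hd, words_val text hd, longest_val text hd]
  simp only [zero_add]
  rw [max_eq_right (mlF_nonneg text.toList 0 le_rfl)]
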